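-- pv_equiv track=rewrite | github.com/k-acdm/mykt-eitango | scripts/generate_kiso_questions/rank_19_decimal_addsub.py | _resolve_band_c_subkind
-- ===== SOURCE A (Python) =====
-- from typing import Any, Dict, List, Optional, Tuple
--
-- def _resolve_band_c_subkind(slot_index: int, subcounts: Dict[str, int]) -> str:
--     """slot_index → "int_minus_dec" / "rest_diff"。"""
--     cumulative = 0
--     for subkind in ("int_minus_dec", "rest_diff"):
--         c = subcounts.get(subkind, 0)
--         if c == 0:
--             continue
--         if slot_index < cumulative + c:
--             return subkind
--         cumulative += c
--     return "rest_diff"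
-- ===== SOURCE B (Python) =====
-- def _resolve_band_c_subkind(slot_index: int, subcounts: dict) -> str:
--     """Closed form: the first key is the only one that can win; every other path yields "rest_diff"."""
--     n = subcounts.get("int_minus_dec", 0)
--     return "int_minus_dec" if n != 0 and slot_index < n else "rest_diff"
-- ===== Notes on version B (the rewrite author's own statement) =====
-- stated objective: simpler
-- what changed: Replaces the cumulative loop over both subkinds by a single closed-form test on the first key's count, since every other path of the loop returns "rest_diff".
import Mathlib
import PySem

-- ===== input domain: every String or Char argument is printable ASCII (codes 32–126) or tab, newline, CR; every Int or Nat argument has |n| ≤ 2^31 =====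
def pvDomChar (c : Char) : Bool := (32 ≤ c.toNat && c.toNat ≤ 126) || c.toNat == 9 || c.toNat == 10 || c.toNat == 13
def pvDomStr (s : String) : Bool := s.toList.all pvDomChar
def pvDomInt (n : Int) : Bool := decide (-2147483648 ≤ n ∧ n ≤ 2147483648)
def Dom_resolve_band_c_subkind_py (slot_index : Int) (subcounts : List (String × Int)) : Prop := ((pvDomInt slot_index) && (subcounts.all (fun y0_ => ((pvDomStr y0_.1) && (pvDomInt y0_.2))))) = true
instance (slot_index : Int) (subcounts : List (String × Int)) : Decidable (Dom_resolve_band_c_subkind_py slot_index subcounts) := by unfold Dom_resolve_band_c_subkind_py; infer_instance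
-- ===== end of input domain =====

-- ===== PORT A =====
def pvALoop (slot_index : Int) (subcounts : List (String × Int)) (cumulative : Int) : List String → String
  | [] => "rest_diff"
  | subkind :: rest =>
    let c := PySem.Dict.getD (PySem.Dict.mk subcounts) subkind 0
    if c = 0 then pvALoop slot_index subcounts cumulative rest
    else if slot_index < cumulative + c then subkind
    else pvALoop slot_index subcounts (cumulative + c) rest

def resolve_band_c_subkind_py (slot_index : Int) (subcounts : List (String × Int)) : String :=
  pvALoop slot_index subcounts 0 ["int_minus_dec", "rest_diff"]

-- ===== PORT B =====
-- B changes the loop into one closed-form test on the first key's count (same value, simpler).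
def resolve_band_c_subkind_py_alt (slot_index : Int) (subcounts : List (String × Int)) : String :=
  let n := PySem.Dict.getD (PySem.Dict.mk subcounts) "int_minus_dec" 0
  if n ≠ 0 ∧ slot_index < n then "int_minus_dec" else "rest_diff"

-- ===== PRECONDITION & SPEC =====
def Spec_resolve_band_c_subkind_py (slot_index : Int) (subcounts : List (String × Int)) (out : String) : Prop := out = resolve_band_c_subkind_py_alt slot_index subcounts
instance (slot_index : Int) (subcounts : List (String × Int)) (out : String) : Decidable (Spec_resolve_band_c_subkind_py slot_index subcounts out) := by unfold Spec_resolve_band_c_subkind_py; infer_instance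

-- ===== CLAIM (what is proved, stated in full; the proofs are below) =====
def Claim_equal_resolve_band_c_subkind_py : Prop := ∀ (slot_index : Int) (subcounts : List (String × Int)), Dom_resolve_band_c_subkind_py slot_index subcounts → Spec_resolve_band_c_subkind_py slot_index subcounts (resolve_band_c_subkind_py slot_index subcounts)

-- ===== LEMMAS AND PROOFS =====

-- ===== VERDICT (by name: the statement is the Claim_ definition above) =====
theorem resolve_band_c_subkind_py_spec : Claim_equal_resolve_band_c_subkind_py := by
  intro slot_index subcounts _
  unfold Spec_resolve_band_c_subkind_py resolve_band_c_subkind_py resolve_band_c_subkind_py_alt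
  simp only [pvALoop]
  by_cases h1 : PySem.Dict.getD (PySem.Dict.mk subcounts) "int_minus_dec" 0 = 0
  · rw [if_pos h1]
    conv_rhs => rw [if_neg (fun h => h.1 h1)]
    split_ifs <;> rfl
  · by_cases h2 : slot_index < PySem.Dict.getD (PySem.Dict.mk subcounts) "int_minus_dec" 0
    · rw [if_neg h1, if_pos (by omega), if_pos ⟨h1, h2⟩]
    · rw [if_neg h1, if_neg (by omega)]
      conv_rhs => rw [if_neg (fun h => h2 h.2)]
      split_ifs <;> rfl
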